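-- pv_equiv track=rewrite | github.com/laracmv/Academia-Python | academia python/8dicionario/medio/quadrodemedalhas.py | pais_campeao
-- ===== SOURCE A (Python) =====
-- def pais_campeao(quadro):
--     # verifica ouros
--     vencedores_ouro = []
--     max_ouro = 0
--     for pais, medalhas in quadro.items():
--         if medalhas['ouro'] == max_ouro:
--             vencedores_ouro.append(pais)
--         if medalhas['ouro'] > max_ouro:
--             vencedores_ouro = [pais]
--             max_ouro = medalhas['ouro']
--
--     if len(vencedores_ouro) == 1:
--         return vencedores_ouro[0]
--
--     # verifica pratas
--     vencedores_prata = []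
--     max_prata = 0
--     for pais in vencedores_ouro:
--         qtd_prata = quadro[pais]['prata']
--         if qtd_prata == max_prata:
--             vencedores_prata.append(pais)
--         if qtd_prata > max_prata:
--             vencedores_prata = [pais]
--             max_prata = qtd_prata
--
--     if len(vencedores_prata) == 1:
--         return vencedores_prata[0]
--
--     # verifica bronzes
--     vencedores_bronze = []
--     max_bronze = 0
--     for pais in vencedores_prata:
--         qtd_bronze = quadro[pais]['bronze']
--         if qtd_bronze == max_bronze:
--             vencedores_bronze.append(pais)
--         if qtd_bronze > max_bronze:
--             vencedores_bronze = [pais]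
--             max_bronze = qtd_bronze
--
--     return vencedores_bronze[0]
-- ===== SOURCE B (Python) =====
-- def pais_campeao(quadro):
--     return max(quadro, key=lambda pais: (quadro[pais]['ouro'],
--                                          quadro[pais].get('prata', 0),
--                                          quadro[pais].get('bronze', 0)))
-- ===== Notes on version B (the rewrite author's own statement) =====
-- stated objective: idiomatic
-- what changed: Replaces A's three staged filtering passes (running-max winner lists with early returns per medal) by a single max() over the countries keyed by the (gold, silver, bronze) tuple (absent silver/bronze read as 0), compared lexicographically in one pass.
import Mathlib
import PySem

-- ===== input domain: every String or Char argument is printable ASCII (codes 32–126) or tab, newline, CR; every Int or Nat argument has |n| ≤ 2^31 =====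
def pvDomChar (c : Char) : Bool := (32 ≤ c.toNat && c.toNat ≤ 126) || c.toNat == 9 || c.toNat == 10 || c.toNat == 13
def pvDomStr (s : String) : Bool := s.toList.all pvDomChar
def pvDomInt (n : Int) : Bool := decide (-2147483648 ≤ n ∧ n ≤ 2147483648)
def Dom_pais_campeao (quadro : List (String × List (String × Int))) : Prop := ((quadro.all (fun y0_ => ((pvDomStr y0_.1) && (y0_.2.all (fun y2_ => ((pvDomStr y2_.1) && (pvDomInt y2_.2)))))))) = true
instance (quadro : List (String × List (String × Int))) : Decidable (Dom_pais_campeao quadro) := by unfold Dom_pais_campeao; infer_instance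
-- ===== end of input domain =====

-- B replaces A's three staged filtering passes (running-max winner lists with early
-- returns per medal) by a single max() over the countries keyed by the full
-- (gold, silver, bronze) tuple, compared lexicographically in one pass (objective: idiomatic).

set_option maxRecDepth 4000


-- ===== PORT A =====
-- medalhas['crit']: dict lookup = first match in the association list; the default 0 is
-- unreachable under Pre_ (the key is present wherever A reads it, else Python's KeyError)
def pvGetCrit (m : List (String × Int)) (k : String) : Int := (m.lookup k).getD 0
-- quadro[pais]: the default [] is unreachable under Pre_ (pais always comes from quadro)
def pvLookupPais (quadro : List (String × List (String × Int))) (p : String) : List (String × Int) :=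
  (quadro.lookup p).getD []
-- A's running-max/reset loop, written once: state = (vencedores, max); the Python repeats
-- this loop verbatim three times, appending `pais` (f projects the appended element)
def pvRunLoop {α β : Type} (v : α → Int) (f : α → β) (l : List α) (st : List β × Int) : List β × Int :=
  l.foldl (fun st x =>
    let w := v x
    let st1 := if w = st.2 then (st.1 ++ [f x], st.2) else st
    if w > st1.2 then ([f x], w) else st1) st

def pais_campeao (quadro : List (String × List (String × Int))) : String :=
  let vo := pvRunLoop (fun pm => pvGetCrit pm.2 "ouro") Prod.fst quadro ([], 0)
  if vo.1.length = 1 then vo.1.headD "" else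
  let vp := pvRunLoop (fun p => pvGetCrit (pvLookupPais quadro p) "prata") id vo.1 ([], 0)
  if vp.1.length = 1 then vp.1.headD "" else
  let vb := pvRunLoop (fun p => pvGetCrit (pvLookupPais quadro p) "bronze") id vp.1 ([], 0)
  vb.1.headD ""   -- vencedores_bronze[0]; the empty case (IndexError) is outside Pre_

-- ===== PORT B =====
-- the key tuple (quadro[pais]['ouro'], quadro[pais].get('prata', 0), quadro[pais].get('bronze', 0));
-- the getD 0 on prata/bronze is exactly .get(crit, 0); the defaults on the country lookup
-- and on 'ouro' are unreachable under Pre_ (pais comes from quadro, 'ouro' present)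
def pvKeyB (quadro : List (String × List (String × Int))) (p : String) : Int × Int × Int :=
  ((((quadro.lookup p).getD []).lookup "ouro").getD 0,
   (((quadro.lookup p).getD []).lookup "prata").getD 0,
   (((quadro.lookup p).getD []).lookup "bronze").getD 0)
-- Python's tuple comparison a < b: lexicographic, component by component (exact for 3-tuples)
def pvLex3Lt (a b : Int × Int × Int) : Bool :=
  a.1 < b.1 || (a.1 == b.1 && (a.2.1 < b.2.1 || (a.2.1 == b.2.1 && a.2.2 < b.2.2)))
-- max(quadro, key=…): PySem has max2? only for 2-component tuple keys, so Python's rule is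
-- written out by hand — scan once, keep the FIRST element, replace only on strictly greater key
def pais_campeao_alt (quadro : List (String × List (String × Int))) : String :=
  match quadro.map Prod.fst with
  | [] => ""   -- max() of an empty dict raises ValueError; outside Pre_
  | x :: t => t.foldl (fun best p =>
      if pvLex3Lt (pvKeyB quadro best) (pvKeyB quadro p) then p else best) x

-- ===== PRECONDITION & SPEC =====
-- helpers for Pre_ only (they do not reach the ports): the medal count of country p, its
-- medal keys, and the leaders of one criterion among a candidate list — the countries
-- whose count attains A's running maximum started at 0, exactly A's per-stage winner list
def pvValOf (quadro : List (String × List (String × Int))) (crit p : String) : Int :=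
  (((quadro.lookup p).getD []).lookup crit).getD 0
def pvKeysOf (quadro : List (String × List (String × Int))) (p : String) : List String :=
  ((quadro.lookup p).getD []).map Prod.fst
def pvLeaders (quadro : List (String × List (String × Int))) (crit : String)
    (c : List String) : List String :=
  c.filter (fun p => pvValOf quadro crit p = c.foldl (fun a x => max a (pvValOf quadro crit x)) 0)
-- Pre_ is the closed-form shape on which Python A returns normally, minus the
-- duplicate-key corner: nonempty board, every country carries an 'ouro' count and some
-- country's is nonnegative (else A's 0-started max leaves its winner list empty and
-- vencedores[0] raises IndexError), and at each undecided tie stage the surviving leaders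
-- carry the next criterion's key ('prata'/'bronze', else A's KeyError) with some count
-- nonnegative.  It also excludes duplicate country/medal names, which a Python dict
-- cannot carry (first-vs-last match order here would be accidental).
def Pre_pais_campeao (quadro : List (String × List (String × Int))) : Prop :=
  quadro ≠ [] ∧ (quadro.map Prod.fst).Nodup ∧
  (∀ pm ∈ quadro, (pm.2.map Prod.fst).Nodup ∧ "ouro" ∈ pm.2.map Prod.fst) ∧
  (∃ pm ∈ quadro, 0 ≤ (pm.2.lookup "ouro").getD 0) ∧
  ((pvLeaders quadro "ouro" (quadro.map Prod.fst)).length = 1 ∨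
    ((∀ p ∈ pvLeaders quadro "ouro" (quadro.map Prod.fst), "prata" ∈ pvKeysOf quadro p) ∧
     (∃ p ∈ pvLeaders quadro "ouro" (quadro.map Prod.fst), 0 ≤ pvValOf quadro "prata" p) ∧
     ((pvLeaders quadro "prata" (pvLeaders quadro "ouro" (quadro.map Prod.fst))).length = 1 ∨
       ((∀ p ∈ pvLeaders quadro "prata" (pvLeaders quadro "ouro" (quadro.map Prod.fst)),
           "bronze" ∈ pvKeysOf quadro p) ∧
        (∃ p ∈ pvLeaders quadro "prata" (pvLeaders quadro "ouro" (quadro.map Prod.fst)),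
           0 ≤ pvValOf quadro "bronze" p)))))
instance (quadro : List (String × List (String × Int))) : Decidable (Pre_pais_campeao quadro) := by
  unfold Pre_pais_campeao; infer_instance

def pvWitness_pais_campeao : (List (String × List (String × Int))) :=
  [("bra", [("ouro", 1), ("prata", 2), ("bronze", 3)]),
   ("arg", [("ouro", 1), ("prata", 2), ("bronze", 1)])]

def Spec_pais_campeao (quadro : List (String × List (String × Int))) (out : String) : Prop := out = pais_campeao_alt quadro
instance (quadro : List (String × List (String × Int))) (out : String) : Decidable (Spec_pais_campeao quadro out) := by unfold Spec_pais_campeao; infer_instance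

-- ===== CLAIM (what is proved, stated in full; the proofs are below) =====
def Claim_equal_pais_campeao : Prop := ∀ (quadro : List (String × List (String × Int))), Dom_pais_campeao quadro → Pre_pais_campeao quadro → Spec_pais_campeao quadro (pais_campeao quadro)

-- ===== LEMMAS AND PROOFS =====

-- the true maximum of f over a nonempty list (0 on [], never used there)
def pvFmax {α : Type} (f : α → Int) : List α → Int
  | [] => 0
  | x :: t => t.foldl (fun m p => max m (f p)) (f x)

-- the lexicographic order on bounded 3-tuples, order-embedded into Int (W = 2^33)
def pvEnc3 (a : Int × Int × Int) : Int := (a.1 * 8589934592 + a.2.1) * 8589934592 + a.2.2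
def pvInB (a : Int × Int × Int) : Prop :=
  -2147483648 ≤ a.1 ∧ a.1 ≤ 2147483648 ∧ -2147483648 ≤ a.2.1 ∧ a.2.1 ≤ 2147483648 ∧
  -2147483648 ≤ a.2.2 ∧ a.2.2 ≤ 2147483648

theorem pv_lex_iff_enc {a b : Int × Int × Int} (ha : pvInB a) (hb : pvInB b) :
    pvLex3Lt a b = true ↔ pvEnc3 a < pvEnc3 b := by
  obtain ⟨a1, a2, a3⟩ := a; obtain ⟨b1, b2, b3⟩ := b
  obtain ⟨h1, h2, h3, h4, h5, h6⟩ := ha; obtain ⟨g1, g2, g3, g4, g5, g6⟩ := hb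
  simp only [pvLex3Lt, pvEnc3, Bool.or_eq_true, Bool.and_eq_true, decide_eq_true_eq, beq_iff_eq]
  dsimp only at *
  omega

theorem pv_enc_mono1 {a b : Int × Int × Int} (ha : pvInB a) (hb : pvInB b)
    (h : a.1 < b.1) : pvEnc3 a < pvEnc3 b := by
  obtain ⟨a1, a2, a3⟩ := a; obtain ⟨b1, b2, b3⟩ := b
  obtain ⟨h1, h2, h3, h4, h5, h6⟩ := ha; obtain ⟨g1, g2, g3, g4, g5, g6⟩ := hb
  simp only [pvEnc3]; dsimp only at *; omega

theorem pv_enc_mono2 {a b : Int × Int × Int} (ha : pvInB a) (hb : pvInB b)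
    (h1 : a.1 = b.1) (h : a.2.1 < b.2.1) : pvEnc3 a < pvEnc3 b := by
  obtain ⟨a1, a2, a3⟩ := a; obtain ⟨b1, b2, b3⟩ := b
  obtain ⟨h1', h2, h3, h4, h5, h6⟩ := ha; obtain ⟨g1, g2, g3, g4, g5, g6⟩ := hb
  simp only [pvEnc3]; dsimp only at *; omega

theorem pv_enc_mono3 {a b : Int × Int × Int}
    (h1 : a.1 = b.1) (h2 : a.2.1 = b.2.1) (h : a.2.2 < b.2.2) : pvEnc3 a < pvEnc3 b := by
  simp only [pvEnc3, h1, h2]; omega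

theorem pv_enc_congr {a b : Int × Int × Int}
    (h1 : a.1 = b.1) (h2 : a.2.1 = b.2.1) (h3 : a.2.2 = b.2.2) : pvEnc3 a = pvEnc3 b := by
  simp only [pvEnc3, h1, h2, h3]

-- pulling a max out of a running maximum
theorem pv_foldl_max_init {α : Type} (v : α → Int) :
    ∀ (t : List α) (a b : Int),
      t.foldl (fun m y => max m (v y)) (max a b) = max a (t.foldl (fun m y => max m (v y)) b) := by
  intro t
  induction t with
  | nil => intro a b; simp
  | cons y s ih =>
    intro a b
    rw [List.foldl_cons, List.foldl_cons]
    rw [max_assoc a b (v y)]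
    exact ih a (max b (v y))

-- a running maximum is its start or attained
theorem pv_foldl_max_attained {α : Type} (f : α → Int) :
    ∀ (t : List α) (a : Int),
      t.foldl (fun m p => max m (f p)) a = a ∨ ∃ p ∈ t, t.foldl (fun m p => max m (f p)) a = f p := by
  intro t
  induction t with
  | nil => intro a; left; rfl
  | cons y s ih =>
    intro a
    rcases ih (max a (f y)) with h | ⟨p, hp, hpe⟩
    · rw [List.foldl_cons, h]
      by_cases hle : f y ≤ a
      · left; exact max_eq_left hle
      · right; exact ⟨y, List.mem_cons_self, max_eq_right (not_le.mp hle).le⟩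
    · right; exact ⟨p, List.mem_cons_of_mem _ hp, by rw [List.foldl_cons]; exact hpe⟩

theorem pvFmax_le {α : Type} (f : α → Int) (c : List α) :
    ∀ p ∈ c, f p ≤ pvFmax f c := by
  cases c with
  | nil => intro p hp; exact absurd hp List.not_mem_nil
  | cons x t =>
    intro p hp
    rcases List.mem_cons.mp hp with rfl | hp'
    · exact (PySem.List.le_foldl_max_int t f (f p)).1
    · exact (PySem.List.le_foldl_max_int t f (f x)).2 p hp'

theorem pvFmax_attained {α : Type} (f : α → Int) (c : List α) (h : c ≠ []) :
    ∃ p ∈ c, f p = pvFmax f c := by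
  cases c with
  | nil => exact absurd rfl h
  | cons x t =>
    rcases pv_foldl_max_attained f t (f x) with h0 | ⟨p, hp, hpe⟩
    · exact ⟨x, List.mem_cons_self, h0.symm⟩
    · exact ⟨p, List.mem_cons_of_mem _ hp, hpe.symm⟩

-- A's 0-started running max is the true max once some value is nonnegative
theorem pv_zero_fold_eq {α : Type} (f : α → Int) (c : List α)
    (h : ∃ p ∈ c, 0 ≤ f p) :
    c.foldl (fun a x => max a (f x)) 0 = pvFmax f c := by
  cases c with
  | nil => obtain ⟨p, hp, _⟩ := h; exact absurd hp List.not_mem_nil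
  | cons x t =>
    obtain ⟨p, hp, hp0⟩ := h
    have : (x :: t).foldl (fun a x => max a (f x)) 0 = max 0 (pvFmax f (x :: t)) := by
      show t.foldl (fun a y => max a (f y)) (max 0 (f x)) = _
      rw [pv_foldl_max_init f t 0 (f x)]; rfl
    rw [this, max_eq_right (le_trans hp0 (pvFmax_le f (x :: t) p hp))]

theorem pv_headD_congr {α : Type} (l : List α) (d d' : α) (h : l ≠ []) :
    l.headD d = l.headD d' := by cases l with | nil => exact absurd rfl h | cons => rfl

-- Python's max(): first-wins strict-replacement fold = first element attaining the maximum key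
theorem pv_foldBest_eq {α : Type} [DecidableEq α] (E : α → Int) :
    ∀ (t : List α) (x : α),
      t.foldl (fun b p => if E b < E p then p else b) x
        = ((x :: t).filter (fun p => E p = pvFmax E (x :: t))).headD x := by
  intro t
  induction t with
  | nil =>
    intro x
    simp [pvFmax, List.filter]
  | cons y s ih =>
    intro x
    have hM : pvFmax E (x :: y :: s) = s.foldl (fun m p => max m (E p)) (max (E x) (E y)) := rfl
    by_cases hxy : E x < E y
    · -- x is replaced by y immediately
      have hM' : pvFmax E (x :: y :: s) = pvFmax E (y :: s) := by
        rw [hM, max_eq_right hxy.le]; rfl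
      rw [List.foldl_cons, if_pos hxy, ih y, hM']
      have hxout : ¬ E x = pvFmax E (y :: s) := by
        have hy : E y ≤ pvFmax E (y :: s) := pvFmax_le E (y :: s) y List.mem_cons_self
        exact ne_of_lt (lt_of_lt_of_le hxy hy)
      have hfil : (x :: y :: s).filter (fun p => decide (E p = pvFmax E (y :: s)))
          = (y :: s).filter (fun p => decide (E p = pvFmax E (y :: s))) :=
        List.filter_cons_of_neg (by simpa using hxout)
      rw [hfil]
      have hne : (y :: s).filter (fun p => E p = pvFmax E (y :: s)) ≠ [] := by
        obtain ⟨p, hp, hpe⟩ := pvFmax_attained E (y :: s) (List.cons_ne_nil y s)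
        intro hnil
        have hmem : p ∈ (y :: s).filter (fun p => E p = pvFmax E (y :: s)) :=
          List.mem_filter.mpr ⟨hp, by simpa using hpe⟩
        rw [hnil] at hmem; exact absurd hmem List.not_mem_nil
      exact pv_headD_congr _ y x hne
    · -- y loses; the maximum over x :: y :: s equals that over x :: s
      have hM' : pvFmax E (x :: y :: s) = pvFmax E (x :: s) := by
        rw [hM, max_eq_left (not_lt.mp hxy)]; rfl
      rw [List.foldl_cons, if_neg hxy, ih x, hM']
      by_cases hx : E x = pvFmax E (x :: s)
      · rw [List.filter_cons_of_pos (by simpa using hx),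
          List.filter_cons_of_pos (by simpa using hx)]
        rfl
      · have hxlt : E x < pvFmax E (x :: s) :=
          lt_of_le_of_ne (pvFmax_le E (x :: s) x List.mem_cons_self) hx
        have hy : ¬ E y = pvFmax E (x :: s) :=
          ne_of_lt (lt_of_le_of_lt (not_lt.mp hxy) hxlt)
        rw [List.filter_cons_of_neg (by simpa using hx),
          List.filter_cons_of_neg (by simpa using hx),
          List.filter_cons_of_neg (by simpa using hy)]

-- E-maximal elements are f-maximal when f-order refines E-order
theorem pv_emax_imp_fmax {α : Type} (c : List α) (E f : α → Int)
    (hmono : ∀ p ∈ c, ∀ q ∈ c, f p < f q → E p < E q)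
    {p : α} (hp : p ∈ c) (hpe : E p = pvFmax E c) : f p = pvFmax f c := by
  obtain ⟨m, hm, hme⟩ := pvFmax_attained f c (List.ne_nil_of_mem hp)
  rcases lt_or_eq_of_le (pvFmax_le f c p hp) with hlt | heq
  · exfalso
    have : E p < E m := hmono p hp m hm (by rw [hme]; exact hlt)
    have hle : E m ≤ pvFmax E c := pvFmax_le E c m hm
    rw [hpe] at this; exact absurd (lt_of_lt_of_le this hle) (lt_irrefl _)
  · exact heq

-- one tie-break stage: the E-maximal elements all survive the f-filter
theorem pv_stage {α : Type} (c : List α) (E f : α → Int)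
    (hmono : ∀ p ∈ c, ∀ q ∈ c, f p < f q → E p < E q) :
    c.filter (fun p => E p = pvFmax E c)
      = (c.filter (fun p => f p = pvFmax f c)).filter (fun p => E p = pvFmax E c) := by
  rw [List.filter_filter]
  apply List.filter_congr
  intro p hp
  by_cases hE : E p = pvFmax E c
  · have hf := pv_emax_imp_fmax c E f hmono hp hE
    simp [hE, hf]
  · simp [hE]

-- and the E-maximum is unchanged by the f-filter
theorem pv_stage_max {α : Type} (c : List α) (E f : α → Int) (hne : c ≠ [])
    (hmono : ∀ p ∈ c, ∀ q ∈ c, f p < f q → E p < E q) :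
    pvFmax E (c.filter (fun p => f p = pvFmax f c)) = pvFmax E c := by
  obtain ⟨m, hm, hme⟩ := pvFmax_attained E c hne
  have hmem : m ∈ c.filter (fun p => f p = pvFmax f c) :=
    List.mem_filter.mpr ⟨hm, by simpa using pv_emax_imp_fmax c E f hmono hm hme⟩
  apply le_antisymm
  · obtain ⟨p, hp, hpe⟩ := pvFmax_attained E _ (List.ne_nil_of_mem hmem)
    rw [← hpe]
    exact pvFmax_le E c p (List.mem_of_mem_filter hp)
  · rw [← hme]; exact pvFmax_le E _ m hmem

-- final stage: when f-order determines E-order exactly, the two filters coincide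
theorem pv_final {α : Type} (c : List α) (E f : α → Int)
    (hmono : ∀ p ∈ c, ∀ q ∈ c, f p < f q → E p < E q)
    (hinj : ∀ p ∈ c, ∀ q ∈ c, f p = f q → E p = E q) :
    c.filter (fun p => E p = pvFmax E c) = c.filter (fun p => f p = pvFmax f c) := by
  apply List.filter_congr
  intro p hp
  by_cases hE : E p = pvFmax E c
  · simp [hE, pv_emax_imp_fmax c E f hmono hp hE]
  · suffices h : ¬ f p = pvFmax f c by simp [hE, h]
    intro hf
    apply hE
    obtain ⟨m, hm, hme⟩ := pvFmax_attained E c (List.ne_nil_of_mem hp)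
    have hfm := pv_emax_imp_fmax c E f hmono hm hme
    rw [← hme]
    exact hinj m hm p hp (by rw [hfm, hf])
    |>.symm

theorem pv_lookup_cons {ν : Type} (t : List (String × ν)) (a k : String) (b : ν) :
    List.lookup k ((a, b) :: t) = if k = a then some b else List.lookup k t := by
  simp [List.lookup]; split <;> simp_all

theorem pv_lookup_self {ν : Type} : ∀ (l : List (String × ν)) (pm : String × ν),
    (l.map Prod.fst).Nodup → pm ∈ l → l.lookup pm.1 = some pm.2 := by
  intro l
  induction l with
  | nil => intro pm _ h; exact absurd h (List.not_mem_nil)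
  | cons x t ih =>
    intro pm hnd hmem
    obtain ⟨a, b⟩ := x
    rw [List.map_cons, List.nodup_cons] at hnd
    rcases List.mem_cons.mp hmem with rfl | hmem'
    · rw [pv_lookup_cons, if_pos rfl]
    · have hne : pm.1 ≠ a := by
        intro hqe
        exact hnd.1 (show a ∈ t.map Prod.fst by
          rw [← hqe]; exact List.mem_map_of_mem (f := Prod.fst) hmem')
      rw [pv_lookup_cons, if_neg hne]
      exact ih pm hnd.2 hmem'

theorem pv_mem_of_lookup {ν : Type} : ∀ (l : List (String × ν)) (k : String) (v : ν),
    l.lookup k = some v → (k, v) ∈ l := by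
  intro l
  induction l with
  | nil => intro k v h; simp [List.lookup] at h
  | cons x t ih =>
    intro k v h
    obtain ⟨a, b⟩ := x
    rw [pv_lookup_cons] at h
    by_cases hk : k = a
    · subst hk
      rw [if_pos rfl] at h
      injection h with h'
      subst h'
      exact List.mem_cons_self
    · rw [if_neg hk] at h
      exact List.mem_cons_of_mem _ (ih k v h)

-- Dom bounds every medal count read through the lookups
theorem pv_key_bound (quadro : List (String × List (String × Int)))
    (hdom : Dom_pais_campeao quadro) (p : String) : pvInB (pvKeyB quadro p) := by
  have hbound : ∀ crit : String, -2147483648 ≤ (((quadro.lookup p).getD []).lookup crit).getD 0 ∧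
      (((quadro.lookup p).getD []).lookup crit).getD 0 ≤ 2147483648 := by
    intro crit
    cases hq : quadro.lookup p with
    | none => simp
    | some m =>
      cases hm : m.lookup crit with
      | none => simp [hm]
      | some v =>
        have hpm : (p, m) ∈ quadro := pv_mem_of_lookup quadro p m hq
        have hv : (crit, v) ∈ m := pv_mem_of_lookup m crit v hm
        unfold Dom_pais_campeao at hdom
        rw [List.all_eq_true] at hdom
        have h1 := hdom (p, m) hpm
        rw [Bool.and_eq_true, List.all_eq_true] at h1
        have h2 := h1.2 (crit, v) hv
        rw [Bool.and_eq_true] at h2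
        have h3 := h2.2
        unfold pvDomInt at h3
        rw [decide_eq_true_eq] at h3
        simp [hm]
        omega
  exact ⟨(hbound "ouro").1, (hbound "ouro").2, (hbound "prata").1, (hbound "prata").2,
    (hbound "bronze").1, (hbound "bronze").2⟩

-- A's loop output: elements attaining the final maximum (proved on the shared loop body)
theorem pvRunLoop_eq {α β : Type} (v : α → Int) (f : α → β) :
    ∀ (l : List α) (ws : List β) (m : Int),
      pvRunLoop v f l (ws, m) =
        ((if m = l.foldl (fun a x => max a (v x)) m then ws else []) ++
           (l.filter (fun x => v x = l.foldl (fun a x => max a (v x)) m)).map f,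
         l.foldl (fun a x => max a (v x)) m) := by
  intro l
  induction l with
  | nil => intro ws m; simp [pvRunLoop]
  | cons x t ih =>
    intro ws m
    have hstep : pvRunLoop v f (x :: t) (ws, m) =
        pvRunLoop v f t (if v x > (if v x = m then (ws ++ [f x], m) else (ws, m)).2
          then ([f x], v x) else (if v x = m then (ws ++ [f x], m) else (ws, m))) := by
      simp [pvRunLoop, List.foldl_cons]
    rcases lt_trichotomy (v x) m with hlt | heq | hgt
    · have hne : v x ≠ m := ne_of_lt hlt
      have hst : (if v x > (if v x = m then (ws ++ [f x], m) else (ws, m)).2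
          then ([f x], v x) else (if v x = m then (ws ++ [f x], m) else (ws, m))) = (ws, m) := by
        rw [if_neg hne]; exact if_neg (show ¬ v x > (ws, m).2 from not_lt.mpr hlt.le)
      have hM : (x :: t).foldl (fun a x => max a (v x)) m = t.foldl (fun a x => max a (v x)) m := by
        simp [List.foldl_cons, max_eq_left hlt.le]
      have hxne : v x ≠ t.foldl (fun a x => max a (v x)) m :=
        ne_of_lt (lt_of_lt_of_le hlt (PySem.List.le_foldl_max_int t v m).1)
      rw [hstep, hst, ih ws m, hM, List.filter_cons, decide_eq_false hxne]
      simp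
    · have hst : (if v x > (if v x = m then (ws ++ [f x], m) else (ws, m)).2
          then ([f x], v x) else (if v x = m then (ws ++ [f x], m) else (ws, m)))
          = (ws ++ [f x], m) := by
        rw [if_pos heq]; exact if_neg (show ¬ v x > (ws ++ [f x], m).2 by simp [heq])
      have hM : (x :: t).foldl (fun a x => max a (v x)) m = t.foldl (fun a x => max a (v x)) m := by
        simp [List.foldl_cons, max_eq_left heq.le]
      rw [hstep, hst, ih (ws ++ [f x]) m, hM, List.filter_cons]
      by_cases hm : m = t.foldl (fun a x => max a (v x)) m
      · have hx : v x = t.foldl (fun a x => max a (v x)) m := heq.trans hm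
        rw [if_pos hm, if_pos hm, decide_eq_true hx]
        simp
      · have hxne : ¬ v x = t.foldl (fun a x => max a (v x)) m := by rw [heq]; exact hm
        rw [if_neg hm, if_neg hm, decide_eq_false hxne]
        simp
    · have hne : v x ≠ m := ne_of_gt hgt
      have hst : (if v x > (if v x = m then (ws ++ [f x], m) else (ws, m)).2
          then ([f x], v x) else (if v x = m then (ws ++ [f x], m) else (ws, m)))
          = ([f x], v x) := by
        rw [if_neg hne]; exact if_pos (show v x > (ws, m).2 from hgt)
      have hM : (x :: t).foldl (fun a x => max a (v x)) m
          = t.foldl (fun a x => max a (v x)) (v x) := by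
        simp [List.foldl_cons, max_eq_right hgt.le]
      have hmne : m ≠ t.foldl (fun a x => max a (v x)) (v x) :=
        ne_of_lt (lt_of_lt_of_le hgt (PySem.List.le_foldl_max_int t v (v x)).1)
      rw [hstep, hst, ih [f x] (v x), hM, if_neg hmne, List.filter_cons]
      by_cases hx : v x = t.foldl (fun a x => max a (v x)) (v x)
      · rw [if_pos hx, decide_eq_true hx]
        simp
      · rw [if_neg hx, decide_eq_false hx]
        simp

-- A's prata/bronze stage over a candidate list is exactly pvLeaders
theorem pv_runloop_leaders (quadro : List (String × List (String × Int))) (crit : String)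
    (c : List String) :
    (pvRunLoop (fun p => pvGetCrit (pvLookupPais quadro p) crit) id c ([], 0)).1
      = pvLeaders quadro crit c := by
  have hv : (fun p => pvGetCrit (pvLookupPais quadro p) crit) = pvValOf quadro crit := rfl
  rw [hv, pvRunLoop_eq, pvLeaders]
  simp

theorem pais_campeao_spec_aux :
    ∀ (quadro : List (String × List (String × Int))), Dom_pais_campeao quadro →
      Pre_pais_campeao quadro → pais_campeao quadro = pais_campeao_alt quadro := by
  intro q hdom hpre
  obtain ⟨hqne, hnd, _hkeys, hex1, hcas⟩ := hpre
  have hb : ∀ p : String, pvInB (pvKeyB q p) := pv_key_bound q hdom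
  have hlne : q.map Prod.fst ≠ [] := by
    intro h; exact hqne (List.map_eq_nil_iff.mp h)
  obtain ⟨x, t, hlq⟩ : ∃ x t, q.map Prod.fst = x :: t := by
    cases hlq : q.map Prod.fst with
    | nil => exact absurd hlq hlne
    | cons a b => exact ⟨a, b, rfl⟩
  -- the medal values read back through the lookups agree with A's in-hand values
  have hagree : ∀ (crit : String), ∀ pm ∈ q, pvValOf q crit pm.1 = pvGetCrit pm.2 crit := by
    intro crit pm hm
    unfold pvValOf pvGetCrit
    rw [pv_lookup_self q pm hnd hm]
    rfl
  have hK1 : ∀ p, (pvKeyB q p).1 = pvValOf q "ouro" p := fun _ => rfl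
  have hK2 : ∀ p, (pvKeyB q p).2.1 = pvValOf q "prata" p := fun _ => rfl
  have hK3 : ∀ p, (pvKeyB q p).2.2 = pvValOf q "bronze" p := fun _ => rfl
  have hmono1 : ∀ p ∈ q.map Prod.fst, ∀ r ∈ q.map Prod.fst,
      pvValOf q "ouro" p < pvValOf q "ouro" r →
        (fun r => pvEnc3 (pvKeyB q r)) p < (fun r => pvEnc3 (pvKeyB q r)) r := by
    intro p _ r _ h
    exact pv_enc_mono1 (hb p) (hb r) (by rw [hK1, hK1]; exact h)
  -- B = first country whose encoded key attains the maximum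
  have hstep : ∀ (b a : String), (if pvLex3Lt (pvKeyB q b) (pvKeyB q a) then a else b)
      = (if pvEnc3 (pvKeyB q b) < pvEnc3 (pvKeyB q a) then a else b) := by
    intro b a
    by_cases h : pvEnc3 (pvKeyB q b) < pvEnc3 (pvKeyB q a)
    · rw [if_pos h, if_pos ((pv_lex_iff_enc (hb b) (hb a)).mpr h)]
    · rw [if_neg h, if_neg (fun hc => h ((pv_lex_iff_enc (hb b) (hb a)).mp hc))]
  have hBfold : pais_campeao_alt q
      = t.foldl (fun best p => if pvLex3Lt (pvKeyB q best) (pvKeyB q p) then p else best) x := by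
    unfold pais_campeao_alt
    rw [hlq]
  have hBalt : pais_campeao_alt q
      = ((x :: t).filter (fun p => pvEnc3 (pvKeyB q p)
          = pvFmax (fun r => pvEnc3 (pvKeyB q r)) (x :: t))).headD x := by
    rw [hBfold, PySem.List.foldl_congr_mem t
      (fun best p => if pvLex3Lt (pvKeyB q best) (pvKeyB q p) then p else best)
      (fun best p => if pvEnc3 (pvKeyB q best) < pvEnc3 (pvKeyB q p) then p else best)
      x (fun acc a _ => hstep acc a)]
    exact pv_foldBest_eq (fun r => pvEnc3 (pvKeyB q r)) t x
  rw [hBalt, ← hlq]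
  -- the set of lexicographically maximal countries
  set S := (q.map Prod.fst).filter (fun p => pvEnc3 (pvKeyB q p)
    = pvFmax (fun r => pvEnc3 (pvKeyB q r)) (q.map Prod.fst)) with hSdef
  have hSne : S ≠ [] := by
    obtain ⟨p, hp, hpe⟩ := pvFmax_attained (fun r => pvEnc3 (pvKeyB q r)) _ hlne
    intro h
    have hmem : p ∈ S := List.mem_filter.mpr ⟨hp, by simpa using hpe⟩
    rw [h] at hmem; exact absurd hmem List.not_mem_nil
  have hhead : ∀ (c : List String) (a : String), (∀ y ∈ S, y ∈ c) → c = [a] →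
      S.headD x = a := by
    intro c a hsub hca
    cases hS : S with
    | nil => exact absurd hS hSne
    | cons s0 ss =>
      have hm : s0 ∈ c := hsub s0 (hS ▸ List.mem_cons_self)
      rw [hca] at hm
      simpa using hm
  -- A's gold stage
  have hM0 : (q.map Prod.fst).foldl (fun a p => max a (pvValOf q "ouro" p)) 0
      = q.foldl (fun a pm => max a (pvGetCrit pm.2 "ouro")) 0 := by
    rw [List.foldl_map]
    exact PySem.List.foldl_congr_mem _ _ _ _
      (fun acc pm hm => by rw [hagree "ouro" pm hm])
  have hexl : ∃ p ∈ q.map Prod.fst, 0 ≤ pvValOf q "ouro" p := by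
    obtain ⟨pm0, hpm0, hpm0v⟩ := hex1
    exact ⟨pm0.1, List.mem_map_of_mem hpm0, by rw [hagree "ouro" pm0 hpm0]; exact hpm0v⟩
  have hGold : (pvRunLoop (fun pm => pvGetCrit pm.2 "ouro") Prod.fst q ([], 0)).1
      = (q.map Prod.fst).filter (fun p => pvValOf q "ouro" p
          = pvFmax (pvValOf q "ouro") (q.map Prod.fst)) := by
    rw [pvRunLoop_eq]
    simp only [ite_self, List.nil_append]
    rw [← pv_zero_fold_eq (pvValOf q "ouro") _ hexl, hM0, List.filter_map]
    congr 1
    apply List.filter_congr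
    intro pm hm
    simp [Function.comp, hagree "ouro" pm hm]
  have hLead1 : pvLeaders q "ouro" (q.map Prod.fst)
      = (q.map Prod.fst).filter (fun p => pvValOf q "ouro" p
          = pvFmax (pvValOf q "ouro") (q.map Prod.fst)) := by
    unfold pvLeaders
    rw [pv_zero_fold_eq (pvValOf q "ouro") _ hexl]
  set c1 := (q.map Prod.fst).filter (fun p => pvValOf q "ouro" p
    = pvFmax (pvValOf q "ouro") (q.map Prod.fst)) with hc1def
  have hc1sub : ∀ y ∈ c1, y ∈ q.map Prod.fst := fun y hy => List.mem_of_mem_filter hy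
  have hc1val : ∀ y ∈ c1, pvValOf q "ouro" y = pvFmax (pvValOf q "ouro") (q.map Prod.fst) := by
    intro y hy; simpa using (List.mem_filter.mp hy).2
  have hS1 : S = c1.filter (fun p => pvEnc3 (pvKeyB q p)
      = pvFmax (fun r => pvEnc3 (pvKeyB q r)) c1) := by
    rw [hSdef, pv_stage (q.map Prod.fst) (fun r => pvEnc3 (pvKeyB q r)) (pvValOf q "ouro") hmono1,
      pv_stage_max (q.map Prod.fst) (fun r => pvEnc3 (pvKeyB q r)) (pvValOf q "ouro") hlne hmono1]
  have hSsub1 : ∀ y ∈ S, y ∈ c1 := by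
    intro y hy; rw [hS1] at hy; exact List.mem_of_mem_filter hy
  -- walk A's three stages
  unfold pais_campeao
  simp only [hGold]
  by_cases h1 : c1.length = 1
  · rw [if_pos h1]
    obtain ⟨a, ha⟩ := List.length_eq_one_iff.mp h1
    rw [ha]
    exact (hhead c1 a hSsub1 ha).symm
  · rw [if_neg h1]
    have hc1ne : c1 ≠ [] := by
      cases hS : S with
      | nil => exact absurd hS hSne
      | cons s0 ss =>
        exact List.ne_nil_of_mem (hSsub1 s0 (by rw [hS]; exact List.mem_cons_self))
    have hcas2 := hcas.resolve_left (by rw [hLead1]; exact h1)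
    obtain ⟨_hkeys2, hex2L, hcas3⟩ := hcas2
    have hex2 : ∃ p ∈ c1, 0 ≤ pvValOf q "prata" p := by
      rw [hLead1] at hex2L; exact hex2L
    have hSilver : (pvRunLoop (fun p => pvGetCrit (pvLookupPais q p) "prata") id c1 ([], 0)).1
        = c1.filter (fun p => pvValOf q "prata" p = pvFmax (pvValOf q "prata") c1) := by
      rw [pv_runloop_leaders]
      unfold pvLeaders
      rw [pv_zero_fold_eq (pvValOf q "prata") c1 hex2]
    rw [hSilver]
    set c2 := c1.filter (fun p => pvValOf q "prata" p = pvFmax (pvValOf q "prata") c1)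
      with hc2def
    have hmono2 : ∀ p ∈ c1, ∀ r ∈ c1, pvValOf q "prata" p < pvValOf q "prata" r →
        (fun r => pvEnc3 (pvKeyB q r)) p < (fun r => pvEnc3 (pvKeyB q r)) r := by
      intro p hp r hr h
      exact pv_enc_mono2 (hb p) (hb r)
        (by rw [hK1, hK1, hc1val p hp, hc1val r hr]) (by rw [hK2, hK2]; exact h)
    have hS2 : S = c2.filter (fun p => pvEnc3 (pvKeyB q p)
        = pvFmax (fun r => pvEnc3 (pvKeyB q r)) c2) := by
      rw [hS1, pv_stage c1 (fun r => pvEnc3 (pvKeyB q r)) (pvValOf q "prata") hmono2,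
        pv_stage_max c1 (fun r => pvEnc3 (pvKeyB q r)) (pvValOf q "prata") hc1ne hmono2]
    have hc2sub : ∀ y ∈ c2, y ∈ c1 := fun y hy => List.mem_of_mem_filter hy
    have hc2val : ∀ y ∈ c2, pvValOf q "prata" y = pvFmax (pvValOf q "prata") c1 := by
      intro y hy; simpa using (List.mem_filter.mp hy).2
    have hSsub2 : ∀ y ∈ S, y ∈ c2 := by
      intro y hy; rw [hS2] at hy; exact List.mem_of_mem_filter hy
    have hLead2 : pvLeaders q "prata" (pvLeaders q "ouro" (q.map Prod.fst)) = c2 := by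
      rw [hLead1]
      unfold pvLeaders
      rw [pv_zero_fold_eq (pvValOf q "prata") c1 hex2]
    by_cases h2 : c2.length = 1
    · rw [if_pos h2]
      obtain ⟨a, ha⟩ := List.length_eq_one_iff.mp h2
      rw [ha]
      exact (hhead c2 a hSsub2 ha).symm
    · rw [if_neg h2]
      have hc2ne : c2 ≠ [] := by
        cases hS : S with
        | nil => exact absurd hS hSne
        | cons s0 ss =>
          exact List.ne_nil_of_mem (hSsub2 s0 (by rw [hS]; exact List.mem_cons_self))
      have hex3 : ∃ p ∈ c2, 0 ≤ pvValOf q "bronze" p := by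
        have h := (hcas3.resolve_left (by rw [hLead2]; exact h2)).2
        rw [hLead2] at h; exact h
      have hBronze : (pvRunLoop (fun p => pvGetCrit (pvLookupPais q p) "bronze") id c2 ([], 0)).1
          = c2.filter (fun p => pvValOf q "bronze" p = pvFmax (pvValOf q "bronze") c2) := by
        rw [pv_runloop_leaders]
        unfold pvLeaders
        rw [pv_zero_fold_eq (pvValOf q "bronze") c2 hex3]
      rw [hBronze]
      have hmono3 : ∀ p ∈ c2, ∀ r ∈ c2, pvValOf q "bronze" p < pvValOf q "bronze" r →
          (fun r => pvEnc3 (pvKeyB q r)) p < (fun r => pvEnc3 (pvKeyB q r)) r := by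
        intro p hp r hr h
        exact pv_enc_mono3
          (by rw [hK1, hK1, hc1val p (hc2sub p hp), hc1val r (hc2sub r hr)])
          (by rw [hK2, hK2, hc2val p hp, hc2val r hr]) (by rw [hK3, hK3]; exact h)
      have hinj3 : ∀ p ∈ c2, ∀ r ∈ c2, pvValOf q "bronze" p = pvValOf q "bronze" r →
          (fun r => pvEnc3 (pvKeyB q r)) p = (fun r => pvEnc3 (pvKeyB q r)) r := by
        intro p hp r hr h
        exact pv_enc_congr
          (by rw [hK1, hK1, hc1val p (hc2sub p hp), hc1val r (hc2sub r hr)])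
          (by rw [hK2, hK2, hc2val p hp, hc2val r hr]) (by rw [hK3, hK3]; exact h)
      have hS3 : S = c2.filter (fun p => pvValOf q "bronze" p
          = pvFmax (pvValOf q "bronze") c2) := by
        rw [hS2]
        exact pv_final c2 (fun r => pvEnc3 (pvKeyB q r)) (pvValOf q "bronze") hmono3 hinj3
      rw [← hS3]
      exact pv_headD_congr S "" x hSne

-- ===== VERDICT (by name: the statement is the Claim_ definition above) =====
theorem pais_campeao_spec : Claim_equal_pais_campeao := by
  intro q hdom hpre
  unfold Spec_pais_campeao
  exact pais_campeao_spec_aux q hdom hpre
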